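-- pv_equiv track=rewrite | github.com/josiah-wolf-oberholtzer/aurora | aurora/nouns/figures/FigureInscriber/FigureInscriber.py | _prepartition
-- ===== SOURCE A (Python) =====
-- def _prepartition(ticks, max):
--     assert max <= ticks
--     parts = []
--     while 0 < (ticks - max):
--         parts.append(max)
--         ticks -= max
--     parts.append(ticks)
--     return parts
-- ===== SOURCE B (Python) =====
-- def _prepartition(ticks, max):
--     assert max <= ticks
--     q, r = divmod(ticks, max)
--     if r == 0:
--         return [max] * q
--     return [max] * q + [r]
-- ===== Notes on version B (the rewrite author's own statement) =====
-- stated objective: simpler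
-- what changed: Replaces the repeated-subtraction while loop with a single divmod: the result is q copies of max plus the remainder if nonzero.
-- outside the precondition, e.g. on _prepartition(0, 0): A returns [0], B raises ZeroDivisionError
import Mathlib
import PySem

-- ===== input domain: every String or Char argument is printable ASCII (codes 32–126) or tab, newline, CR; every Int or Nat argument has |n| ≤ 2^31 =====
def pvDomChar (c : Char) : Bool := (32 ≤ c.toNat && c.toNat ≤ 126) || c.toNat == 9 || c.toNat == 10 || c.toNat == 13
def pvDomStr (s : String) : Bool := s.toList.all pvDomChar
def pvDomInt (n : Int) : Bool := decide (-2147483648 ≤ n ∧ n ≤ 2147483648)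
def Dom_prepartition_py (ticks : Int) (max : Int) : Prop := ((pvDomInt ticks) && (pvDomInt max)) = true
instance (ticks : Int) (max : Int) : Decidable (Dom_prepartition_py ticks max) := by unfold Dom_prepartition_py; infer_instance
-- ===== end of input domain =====

-- B replaces A's repeated-subtraction while loop with one divmod (objective: simpler).

-- ===== PORT A =====
-- A's while loop; the extra `0 < mx` conjunct in the guard only makes the recursion total
-- (Python diverges when mx ≤ 0 < ticks - mx; those inputs are outside Pre_)
def prepLoop (ticks mx : Int) (parts : List Int) : List Int :=
  if _h : 0 < ticks - mx ∧ 0 < mx then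
    prepLoop (ticks - mx) mx (parts ++ [mx])
  else
    parts ++ [ticks]
termination_by (ticks - mx).toNat
decreasing_by omega

def prepartition_py (ticks : Int) (max : Int) : List Int :=
  prepLoop ticks max []

-- ===== PORT B =====
def prepartition_py_alt (ticks : Int) (max : Int) : List Int :=
  match PySem.Int.divmod? ticks max with
  | none => []        -- Source B raises ZeroDivisionError here (max = 0); outside Pre_
  | some (q, r) =>
      if r = 0 then List.replicate q.toNat max
      else List.replicate q.toNat max ++ [r]

-- ===== PRECONDITION & SPEC =====
-- Pre_ excludes: ticks < max (A's assert raises AssertionError); max ≤ 0 < ticks - max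
-- (A's while loop never terminates); and ticks = max = 0, where A returns [0] but
-- B's divmod raises ZeroDivisionError.
def Pre_prepartition_py (ticks : Int) (max : Int) : Prop :=
  max ≤ ticks ∧ (0 < max ∨ (ticks = max ∧ max ≠ 0))
instance (ticks : Int) (max : Int) : Decidable (Pre_prepartition_py ticks max) := by
  unfold Pre_prepartition_py; infer_instance

def pvWitness_prepartition_py : Int × Int := (10, 3)

def Spec_prepartition_py (ticks : Int) (max : Int) (out : List Int) : Prop := out = prepartition_py_alt ticks max
instance (ticks : Int) (max : Int) (out : List Int) : Decidable (Spec_prepartition_py ticks max out) := by unfold Spec_prepartition_py; infer_instance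

-- ===== CLAIM (what is proved, stated in full; the proofs are below) =====
def Claim_equal_prepartition_py : Prop := ∀ (ticks : Int) (max : Int), Dom_prepartition_py ticks max → Pre_prepartition_py ticks max → Spec_prepartition_py ticks max (prepartition_py ticks max)

-- ===== LEMMAS AND PROOFS =====

theorem fdivmod_unique (a b q r : Int) (hb : 0 < b) (h : a = q * b + r)
    (h0 : 0 ≤ r) (h1 : r < b) : a.fdiv b = q ∧ a.fmod b = r := by
  have he : a / b = q ∧ a % b = r :=
    (Int.ediv_emod_unique hb).mpr ⟨by linarith [h], h0, h1⟩
  have hfd : a.fdiv b = a / b := by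
    rw [Int.fdiv_eq_ediv]; simp [le_of_lt hb]
  have hkey := Int.mul_fdiv_add_fmod a b
  constructor
  · rw [hfd, he.1]
  · have hm : a.fmod b = a - b * (a / b) := by rw [← hfd]; omega
    have hc : b * q = q * b := mul_comm b q
    rw [hm, he.1]; omega

theorem alt_eq (ticks mx : Int) (hmx : mx ≠ 0) :
    prepartition_py_alt ticks mx =
      (if ticks.fmod mx = 0 then List.replicate (ticks.fdiv mx).toNat mx
       else List.replicate (ticks.fdiv mx).toNat mx ++ [ticks.fmod mx]) := by
  simp [prepartition_py_alt, PySem.Int.divmod?, hmx]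

theorem alt_base (ticks mx : Int) (hmx : 0 < mx) (ht : 0 < ticks) (hle : ticks ≤ mx) :
    prepartition_py_alt ticks mx = [ticks] := by
  rw [alt_eq ticks mx (by omega)]
  by_cases heq : ticks = mx
  · subst heq
    have hq : ticks.fdiv ticks = 1 := Int.fdiv_self (by omega)
    have hr : ticks.fmod ticks = 0 := by
      have := Int.mul_fdiv_add_fmod ticks ticks
      rw [hq] at this; omega
    simp [hq]
  · obtain ⟨hq, hr⟩ := fdivmod_unique ticks mx 0 ticks hmx (by ring) (by omega) (by omega)
    rw [hq, hr]
    simp only [if_neg (by omega : ¬ ticks = 0)]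
    simp

theorem alt_step (ticks mx : Int) (hmx : 0 < mx) (hgt : 0 < ticks - mx) :
    prepartition_py_alt ticks mx = mx :: prepartition_py_alt (ticks - mx) mx := by
  have hq : ticks.fdiv mx = (ticks - mx).fdiv mx + 1 := by
    have := Int.add_mul_fdiv_right (ticks - mx) 1 (c := mx) (by omega)
    simpa using this
  have hr : ticks.fmod mx = (ticks - mx).fmod mx := by
    have k1 := Int.mul_fdiv_add_fmod ticks mx
    have k2 := Int.mul_fdiv_add_fmod (ticks - mx) mx
    have : mx * (ticks.fdiv mx) = mx * ((ticks - mx).fdiv mx) + mx := by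
      rw [hq]; ring
    omega
  have hqnn : 0 ≤ (ticks - mx).fdiv mx := by
    have := Int.fdiv_nonneg (a := ticks - mx) (b := mx) (by omega) (by omega)
    exact this
  rw [alt_eq ticks mx (by omega), alt_eq (ticks - mx) mx (by omega), hq, hr]
  have : ((ticks - mx).fdiv mx + 1).toNat = ((ticks - mx).fdiv mx).toNat + 1 := by omega
  rw [this]
  split <;> simp [List.replicate_succ]

theorem loop_eq (n : Nat) : ∀ (ticks mx : Int) (parts : List Int), (ticks - mx).toNat ≤ n →
    0 < mx → 0 < ticks →
    prepLoop ticks mx parts = parts ++ prepartition_py_alt ticks mx := by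
  induction n with
  | zero =>
    intro ticks mx parts hn hmx ht
    rw [prepLoop, dif_neg (by omega), alt_base ticks mx hmx ht (by omega)]
  | succ n ih =>
    intro ticks mx parts hn hmx ht
    by_cases h1 : 0 < ticks - mx
    · rw [prepLoop, dif_pos ⟨h1, hmx⟩,
        ih (ticks - mx) mx (parts ++ [mx]) (by omega) hmx (by omega),
        alt_step ticks mx hmx h1]
      simp
    · rw [prepLoop, dif_neg (by omega), alt_base ticks mx hmx ht (by omega)]

-- ===== VERDICT (by name: the statement is the Claim_ definition above) =====
theorem prepartition_py_spec : Claim_equal_prepartition_py := by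
  intro ticks mx _ hpre
  unfold Spec_prepartition_py prepartition_py
  rcases hpre with ⟨hle, hpos | ⟨heq, hne⟩⟩
  · simpa using loop_eq (ticks - mx).toNat ticks mx [] (le_refl _) hpos (by omega)
  · subst heq
    rw [prepLoop, dif_neg (by omega)]
    have hq : ticks.fdiv ticks = 1 := Int.fdiv_self hne
    have hr : ticks.fmod ticks = 0 := by
      have := Int.mul_fdiv_add_fmod ticks ticks
      rw [hq] at this; omega
    simp [alt_eq ticks ticks hne, hq]
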